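-- pv_equiv track=rewrite | github.com/JhaoZ/leetcode-sols | 2209-number-of-equal-count-substrings/number-of-equal-count-substrings.py | equalCountSubstrings
-- ===== SOURCE A (Python) =====
-- def equalCountSubstrings(s: str, count: int) -> int:
--
--     ans = 0
--
--     for k in range(1, 27):
--         # for all possible unique character counts
--         # we are trying to find substrings with k unique characters of freq == count
--         freqs = [0] * 26
--         unique_cnt = 0
--         for i in range(len(s)):
--             length = k * count  # length of the substrings we are considering
--             curr = ord(s[i]) - ord('a')
--             freqs[curr] += 1
--             if freqs[curr] == count:
--                 unique_cnt += 1
--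
--             # move the window
--             if i >= length:
--                 char_curr = ord(s[i - length]) - ord('a')
--                 if freqs[char_curr] == count:
--                     unique_cnt -= 1
--                 freqs[char_curr] -= 1
--
--             # if the unique amt of characters inside a certain window = k
--             # we add 1 to answer
--             if unique_cnt == k:
--                 ans += 1
--     return ans
-- ===== SOURCE B (Python) =====
-- def equalCountSubstrings(s: str, count: int) -> int:
--     # For each possible number k of distinct letters, slide a window of the
--     # exact length k*count and recount it from scratch: a window qualifies
--     # iff every letter slot holds 0 or exactly `count` occurrences.
--     ans = 0
--     n = len(s)
--     for k in range(1, 27):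
--         length = k * count
--         if length <= 0 or length > n:
--             continue
--         for start in range(n - length + 1):
--             freqs = [0] * 26
--             for ch in s[start:start + length]:
--                 freqs[ord(ch) - ord('a')] += 1
--             if all(f == 0 or f == count for f in freqs):
--                 ans += 1
--     return ans
-- ===== Notes on version B (the rewrite author's own statement) =====
-- stated objective: simpler
-- what changed: A keeps an incremental add/evict frequency table and a running count of letters reaching freq==count while scanning every position for every k; B instead, for each k, slides a window of the exact length k*count and recounts it from scratch, accepting a window iff every letter slot holds 0 or exactly count occurrences, skipping k whenever that length is non-positive or longer than s.
import Mathlib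
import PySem

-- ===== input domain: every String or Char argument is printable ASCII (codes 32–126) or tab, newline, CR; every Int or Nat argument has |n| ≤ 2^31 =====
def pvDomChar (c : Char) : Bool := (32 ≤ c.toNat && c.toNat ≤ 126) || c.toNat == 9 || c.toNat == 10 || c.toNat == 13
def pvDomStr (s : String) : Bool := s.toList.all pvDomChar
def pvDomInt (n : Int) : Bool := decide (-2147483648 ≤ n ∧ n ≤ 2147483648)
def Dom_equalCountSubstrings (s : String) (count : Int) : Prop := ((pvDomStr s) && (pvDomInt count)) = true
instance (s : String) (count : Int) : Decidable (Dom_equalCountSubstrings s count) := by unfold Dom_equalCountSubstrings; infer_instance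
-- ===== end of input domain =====

-- B replaces A's incremental add/evict bookkeeping by a per-k fixed-length window recount
-- (objective: simpler); both programs index a 26-slot table by ord(ch)-ord('a') with Python
-- list-index semantics, so they agree on the whole domain where A returns.

-- ===== PORT A =====
-- ord(ch) - ord('a')
def pvOrd (c : Char) : Int := (c.toNat : Int) - 97

-- body of A's `for i in range(len(s))` loop; state is (freqs, unique_cnt, ans)
def pvAStep (count k : Int) (l : List Char) (st : List Int × Int × Int) (i : Int) :
    List Int × Int × Int :=
  let L := k * count
  let curr := pvOrd ((PySem.List.pyGet? l i).getD 'a')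
  let freqs := PySem.List.pySetD st.1 curr (PySem.List.pyGetD st.1 curr 0 + 1)
  let u := if PySem.List.pyGetD freqs curr 0 = count then st.2.1 + 1 else st.2.1
  let p :=
    if L ≤ i then
      let cc := pvOrd ((PySem.List.pyGet? l (i - L)).getD 'a')
      (PySem.List.pySetD freqs cc (PySem.List.pyGetD freqs cc 0 - 1),
       if PySem.List.pyGetD freqs cc 0 = count then u - 1 else u)
    else (freqs, u)
  (p.1, p.2, if p.2 = k then st.2.2 + 1 else st.2.2)

def equalCountSubstrings (s : String) (count : Int) : Int :=
  let l := s.toList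
  (PySem.List.pyRange 1 27 1).foldl
    (fun ans k =>
      ((PySem.List.pyRange 0 (PySem.List.len l) 1).foldl (pvAStep count k l)
        (List.replicate 26 0, 0, ans)).2.2)
    0

-- ===== PORT B =====
-- freqs of one window: `freqs = [0]*26; for ch in w: freqs[ord(ch)-ord('a')] += 1`
def pvWinFreqs (w : List Char) : List Int :=
  w.foldl
    (fun freqs ch =>
      PySem.List.pySetD freqs ((ch.toNat : Int) - 97)
        (PySem.List.pyGetD freqs ((ch.toNat : Int) - 97) 0 + 1))
    (List.replicate 26 0)

def equalCountSubstrings_alt (s : String) (count : Int) : Int :=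
  let l := s.toList
  let n := PySem.List.len l
  (PySem.List.pyRange 1 27 1).foldl
    (fun ans k =>
      let L := k * count
      if L ≤ 0 ∨ n < L then ans
      else
        (PySem.List.pyRange 0 (n - L + 1) 1).foldl
          (fun ans start =>
            if (pvWinFreqs (PySem.List.slice l (some start) (some (start + L)))).all
                (fun f => f == 0 || f == count) then ans + 1
            else ans)
          ans)
    0

-- ===== PRECONDITION & SPEC =====
-- Pre_ excludes exactly the inputs on which A raises IndexError: a character whose
-- ord(ch)-97 falls outside the valid Python index range [-26,25] of the 26-slot table
-- (ord outside [71,122]), and count < 0 on a non-empty string (eviction index past the end).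
def Pre_equalCountSubstrings (s : String) (count : Int) : Prop :=
  (s.toList.all (fun c => 71 ≤ c.toNat && c.toNat ≤ 122) = true) ∧ (s.toList = [] ∨ 0 ≤ count)
instance (s : String) (count : Int) : Decidable (Pre_equalCountSubstrings s count) := by
  unfold Pre_equalCountSubstrings; infer_instance

def pvWitness_equalCountSubstrings : String × Int := ("aabcbc", 2)

def Spec_equalCountSubstrings (s : String) (count : Int) (out : Int) : Prop :=
  out = equalCountSubstrings_alt s count
instance (s : String) (count : Int) (out : Int) : Decidable (Spec_equalCountSubstrings s count out) := by
  unfold Spec_equalCountSubstrings; infer_instance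

-- ===== CLAIM (what is proved, stated in full; the proofs are below) =====
def Claim_equal_equalCountSubstrings : Prop := ∀ (s : String) (count : Int),
  Dom_equalCountSubstrings s count → Pre_equalCountSubstrings s count →
  Spec_equalCountSubstrings s count (equalCountSubstrings s count)

-- ===== LEMMAS AND PROOFS =====

-- the slot of the 26-entry table that Python's list indexing selects for ord(c)-97
def pvEnc (c : Char) : Nat := (c.toNat + 7) % 26

-- occurrences, in window w, of characters landing in slot j
def pvCnt (w : List Char) (j : Nat) : Nat := w.countP (fun c => pvEnc c == j)

-- the 26-entry frequency table of window w
def pvFv (w : List Char) : List Int := (List.range 26).map (fun j => (pvCnt w j : Int))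

-- number of slots whose frequency reached `count`
def pvU (count : Int) (w : List Char) : Int :=
  (((Finset.range 26).filter (fun j => count ≤ (pvCnt w j : Int))).card : Int)

-- the window A's state describes after i iterations: last min(i,Ln) chars of l.take i
def pvWin (l : List Char) (Ln i : Nat) : List Char := (l.take i).drop (i - Ln)

lemma pvEnc_lt (c : Char) : pvEnc c < 26 := Nat.mod_lt _ (by omega)

lemma pvIdx_wrap (t : Nat) (h1 : 71 ≤ t) (h2 : t ≤ 122) :
    PySem.List.pyIdx? 26 ((t : Int) - 97) = some ((t + 7) % 26) := by
  simp only [PySem.List.pyIdx?]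
  split_ifs <;> first | omega | (congr 1; omega)

lemma pvGetD_wrap (xs : List Int) (hx : xs.length = 26) (c : Char)
    (h1 : 71 ≤ c.toNat) (h2 : c.toNat ≤ 122) (d : Int) :
    PySem.List.pyGetD xs ((c.toNat : Int) - 97) d = xs.getD (pvEnc c) d := by
  simp [PySem.List.pyGetD, PySem.List.pyGet?, hx, pvIdx_wrap c.toNat h1 h2,
    List.getD_eq_getElem?_getD, pvEnc]

lemma pvSetD_wrap (xs : List Int) (hx : xs.length = 26) (c : Char)
    (h1 : 71 ≤ c.toNat) (h2 : c.toNat ≤ 122) (v : Int) :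
    PySem.List.pySetD xs ((c.toNat : Int) - 97) v = xs.set (pvEnc c) v := by
  simp [PySem.List.pySetD, PySem.List.pySet?, hx, pvIdx_wrap c.toNat h1 h2, pvEnc]

lemma pvFv_length (w : List Char) : (pvFv w).length = 26 := by
  simp [pvFv]

lemma pvFv_nil : pvFv [] = List.replicate 26 0 := by decide

lemma pvCnt_append (w : List Char) (c : Char) (j : Nat) :
    pvCnt (w ++ [c]) j = pvCnt w j + (if pvEnc c = j then 1 else 0) := by
  simp only [pvCnt, List.countP_append, List.countP_cons, List.countP_nil]
  split_ifs <;> simp_all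

lemma pvCnt_cons (w : List Char) (x : Char) (j : Nat) :
    pvCnt (x :: w) j = pvCnt w j + (if pvEnc x = j then 1 else 0) := by
  simp only [pvCnt, List.countP_cons]
  split_ifs <;> simp_all

lemma pvCnt_ge (w : List Char) (j : Nat) (hj : 26 ≤ j) : pvCnt w j = 0 := by
  simp only [pvCnt, List.countP_eq_zero]
  intro c _
  have := pvEnc_lt c
  simp; omega

lemma pvFv_getD (w : List Char) (j : Nat) (hj : j < 26) (d : Int) :
    (pvFv w).getD j d = (pvCnt w j : Int) := by
  rw [List.getD_eq_getElem?_getD]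
  simp [pvFv, hj]

lemma pvFv_set_inc (w : List Char) (c : Char) :
    (pvFv w).set (pvEnc c) ((pvCnt w (pvEnc c) : Int) + 1) = pvFv (w ++ [c]) := by
  apply List.ext_getElem
  · simp [pvFv]
  · intro i h1 h2
    simp only [pvFv, List.length_map, List.length_range] at h2
    simp only [List.getElem_set, pvFv, List.getElem_map, List.getElem_range, pvCnt_append]
    by_cases h : pvEnc c = i <;> simp [h]

lemma pvFv_set_dec (w : List Char) (x : Char) :
    (pvFv (x :: w)).set (pvEnc x) ((pvCnt (x :: w) (pvEnc x) : Int) - 1) = pvFv w := by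
  apply List.ext_getElem
  · simp [pvFv]
  · intro i h1 h2
    simp only [pvFv, List.length_map, List.length_range] at h2
    simp only [List.getElem_set, pvFv, List.getElem_map, List.getElem_range, pvCnt_cons]
    by_cases h : pvEnc x = i <;> simp [h]

-- filter-card over range 26 when two predicates differ only at one slot
lemma pvCard_update (p q : Nat → Prop) [DecidablePred p] [DecidablePred q] (e : Nat)
    (he : e < 26) (h : ∀ j, j ≠ e → (p j ↔ q j)) :
    (((Finset.range 26).filter q).card : Int) =
      (((Finset.range 26).filter p).card : Int) +
        (if q e then 1 else 0) - (if p e then 1 else 0) := by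
  have hmem : e ∈ Finset.range 26 := Finset.mem_range.mpr he
  have hrange : Finset.range 26 = insert e ((Finset.range 26).erase e) :=
    (Finset.insert_erase hmem).symm
  have hcong : ((Finset.range 26).erase e).filter q =
      ((Finset.range 26).erase e).filter p :=
    Finset.filter_congr (fun j hj => (h j (Finset.ne_of_mem_erase hj)).symm)
  have hnot' : ∀ (r : Nat → Prop) [DecidablePred r],
      e ∉ ((Finset.range 26).erase e).filter r := by
    intro r _
    simp
  rw [hrange, Finset.filter_insert, Finset.filter_insert, hcong]
  split_ifs <;> simp [Finset.card_insert_of_notMem (hnot' _)]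

lemma pvU_append (count : Int) (w : List Char) (c : Char) :
    pvU count (w ++ [c]) =
      pvU count w + (if (pvCnt w (pvEnc c) : Int) + 1 = count then 1 else 0) := by
  have hcc : pvCnt (w ++ [c]) (pvEnc c) = pvCnt w (pvEnc c) + 1 := by
    rw [pvCnt_append, if_pos rfl]
  have h := pvCard_update (fun j => count ≤ (pvCnt w j : Int))
    (fun j => count ≤ (pvCnt (w ++ [c]) j : Int)) (pvEnc c) (pvEnc_lt c)
    (fun j hj => by
      show count ≤ (pvCnt w j : Int) ↔ count ≤ (pvCnt (w ++ [c]) j : Int)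
      rw [pvCnt_append, if_neg (Ne.symm hj), Nat.add_zero])
  unfold pvU
  rw [h]
  beta_reduce
  split_ifs <;> push_cast at * <;> omega

lemma pvU_uncons (count : Int) (w : List Char) (x : Char) :
    pvU count w =
      pvU count (x :: w) - (if (pvCnt (x :: w) (pvEnc x) : Int) = count then 1 else 0) := by
  have hx : pvCnt (x :: w) (pvEnc x) = pvCnt w (pvEnc x) + 1 := by
    rw [pvCnt_cons, if_pos rfl]
  have h := pvCard_update (fun j => count ≤ (pvCnt (x :: w) j : Int))
    (fun j => count ≤ (pvCnt w j : Int)) (pvEnc x) (pvEnc_lt x)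
    (fun j hj => by
      show count ≤ (pvCnt (x :: w) j : Int) ↔ count ≤ (pvCnt w j : Int)
      rw [pvCnt_cons, if_neg (Ne.symm hj), Nat.add_zero])
  unfold pvU
  rw [h]
  beta_reduce
  split_ifs <;> push_cast at * <;> omega

lemma pvSum_cnt (w : List Char) : (∑ j ∈ Finset.range 26, pvCnt w j) = w.length := by
  induction w with
  | nil => simp [pvCnt]
  | cons x w ih =>
    have : ∀ j ∈ Finset.range 26, pvCnt (x :: w) j = pvCnt w j + (if pvEnc x = j then 1 else 0) :=
      fun j _ => pvCnt_cons w x j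
    rw [Finset.sum_congr rfl this, Finset.sum_add_distrib, ih,
      Finset.sum_ite_eq (Finset.range 26) (pvEnc x) (fun _ => 1)]
    simp [Finset.mem_range.mpr (pvEnc_lt x)]

-- the heart: for a window no longer than kN*cN slots-reaching-cN counting equals kN
-- exactly when the window is full and every slot holds 0 or cN
lemma pvU_iff (cN kN : Nat) (hc : 1 ≤ cN) (w : List Char) (hw : w.length ≤ kN * cN) :
    (pvU (cN : Int) w = (kN : Int)) ↔
      (w.length = kN * cN ∧ ∀ j, pvCnt w j = 0 ∨ pvCnt w j = cN) := by
  have hflt : (Finset.range 26).filter (fun j => (cN : Int) ≤ (pvCnt w j : Int)) =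
      (Finset.range 26).filter (fun j => cN ≤ pvCnt w j) :=
    Finset.filter_congr (fun j _ => by simp)
  have hU : pvU (cN : Int) w =
      ((((Finset.range 26).filter (fun j => cN ≤ pvCnt w j)).card : Int)) := by
    unfold pvU
    rw [hflt]
  rw [hU]
  have hsum := pvSum_cnt w
  constructor
  · intro h
    have hcard : ((Finset.range 26).filter (fun j => cN ≤ pvCnt w j)).card = kN := by
      exact_mod_cast h
    have hsplit := Finset.sum_filter_add_sum_filter_not (Finset.range 26)
      (fun j => cN ≤ pvCnt w j) (pvCnt w)
    rw [hsum] at hsplit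
    have hlb : kN * cN ≤ ∑ j ∈ (Finset.range 26).filter (fun j => cN ≤ pvCnt w j), pvCnt w j := by
      have := Finset.card_nsmul_le_sum ((Finset.range 26).filter (fun j => cN ≤ pvCnt w j))
        (pvCnt w) cN (fun j hj => (Finset.mem_filter.mp hj).2)
      rw [smul_eq_mul, hcard] at this
      exact this
    have hs0 : ∑ j ∈ (Finset.range 26).filter (fun j => ¬ cN ≤ pvCnt w j), pvCnt w j = 0 := by
      omega
    have hlen : w.length = kN * cN := by omega
    have hzero := Finset.sum_eq_zero_iff.mp hs0
    have hFeq : ∀ j ∈ (Finset.range 26).filter (fun j => cN ≤ pvCnt w j), pvCnt w j = cN := by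
      by_contra hcon
      push Not at hcon
      obtain ⟨j0, hj0, hne⟩ := hcon
      have hlt : ∑ j ∈ (Finset.range 26).filter (fun j => cN ≤ pvCnt w j), cN <
          ∑ j ∈ (Finset.range 26).filter (fun j => cN ≤ pvCnt w j), pvCnt w j :=
        Finset.sum_lt_sum (fun j hj => (Finset.mem_filter.mp hj).2)
          ⟨j0, hj0, lt_of_le_of_ne (Finset.mem_filter.mp hj0).2 (fun he => hne he.symm)⟩
      rw [Finset.sum_const, smul_eq_mul, hcard] at hlt
      omega
    refine ⟨hlen, fun j => ?_⟩
    by_cases hj26 : j < 26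
    · by_cases hjF : cN ≤ pvCnt w j
      · exact Or.inr (hFeq j (Finset.mem_filter.mpr ⟨Finset.mem_range.mpr hj26, hjF⟩))
      · exact Or.inl (hzero j (Finset.mem_filter.mpr ⟨Finset.mem_range.mpr hj26, hjF⟩))
    · exact Or.inl (pvCnt_ge w j (by omega))
  · rintro ⟨hlen, hall⟩
    have hFeq : (Finset.range 26).filter (fun j => cN ≤ pvCnt w j) =
        (Finset.range 26).filter (fun j => pvCnt w j = cN) :=
      Finset.filter_congr (fun j _ => by rcases hall j with h | h <;> constructor <;>
        intro <;> omega)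
    have h1 : ∑ j ∈ (Finset.range 26).filter (fun j => pvCnt w j = cN), pvCnt w j =
        ((Finset.range 26).filter (fun j => pvCnt w j = cN)).card * cN := by
      rw [Finset.sum_congr rfl (fun j hj => (Finset.mem_filter.mp hj).2),
        Finset.sum_const, smul_eq_mul]
    have h2 : ∑ j ∈ (Finset.range 26).filter (fun j => ¬ pvCnt w j = cN), pvCnt w j = 0 :=
      Finset.sum_eq_zero (fun j hj => by
        rcases hall j with h | h
        · exact h
        · exact absurd h (Finset.mem_filter.mp hj).2)
    have h3 := Finset.sum_filter_add_sum_filter_not (Finset.range 26)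
      (fun j => pvCnt w j = cN) (pvCnt w)
    rw [h1, h2, hsum, hlen] at h3
    have h4 : ((Finset.range 26).filter (fun j => pvCnt w j = cN)).card * cN = kN * cN := by
      simpa using h3
    have hcard : ((Finset.range 26).filter (fun j => pvCnt w j = cN)).card = kN :=
      Nat.eq_of_mul_eq_mul_right (by omega) h4
    rw [hFeq, hcard]

-- the evolution of A's window: one step appends l[i] and, once full, drops the head l[i-Ln]
lemma pvWin_succ_small (l : List Char) (Ln i : Nat) (hi : i < l.length) (h : i < Ln) :
    pvWin l Ln (i + 1) = pvWin l Ln i ++ [l[i]] := by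
  unfold pvWin
  rw [show i + 1 - Ln = 0 by omega, show i - Ln = 0 by omega, List.drop_zero, List.drop_zero,
    List.take_add_one, List.getElem?_eq_getElem hi]
  rfl

lemma pvWin_succ_big (l : List Char) (Ln i : Nat) (hi : i < l.length) (h : Ln ≤ i) :
    pvWin l Ln i ++ [l[i]] = l[i - Ln]'(by omega) :: pvWin l Ln (i + 1) := by
  rcases Nat.eq_zero_or_pos Ln with h0 | h0
  · subst h0
    have e1 : List.drop (i - 0) (List.take i l) = [] := List.drop_eq_nil_of_le (by simp)
    have e2 : List.drop (i + 1 - 0) (List.take (i + 1) l) = [] := List.drop_eq_nil_of_le (by simp)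
    unfold pvWin
    rw [e1, e2]
    simp
  · have hlt : i - Ln < (l.take i).length := by
      simp
      omega
    unfold pvWin
    rw [List.drop_eq_getElem_cons hlt, List.getElem_take, List.cons_append]
    congr 1
    rw [List.take_add_one, List.getElem?_eq_getElem hi]
    have : i + 1 - Ln = (i - Ln) + 1 := by omega
    rw [this, List.drop_append_of_le_length (by simp; omega)]
    rfl

lemma pvWin_length (l : List Char) (Ln i : Nat) (hi : i ≤ l.length) :
    (pvWin l Ln i).length = min i Ln := by
  simp [pvWin]; omega

lemma pvWin_eq_slice (l : List Char) (Ln i : Nat) (_hi : i ≤ l.length) (h : Ln ≤ i) :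
    pvWin l Ln i = (l.drop (i - Ln)).take Ln := by
  rw [pvWin, List.drop_take]
  congr 1
  omega

-- one A-step, described on the abstract state
lemma pvAStep_eq (count k : Int) (l : List Char)
    (hchars : ∀ c ∈ l, 71 ≤ c.toNat ∧ c.toNat ≤ 122)
    (Ln : Nat) (hL : (Ln : Int) = k * count)
    (i : Nat) (hi : i < l.length) (a : Int) :
    pvAStep count k l (pvFv (pvWin l Ln i), pvU count (pvWin l Ln i), a) (i : Int) =
      (pvFv (pvWin l Ln (i + 1)), pvU count (pvWin l Ln (i + 1)),
       if pvU count (pvWin l Ln (i + 1)) = k then a + 1 else a) := by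
  have hmem : l[i] ∈ l := List.getElem_mem hi
  have hc := hchars l[i] hmem
  have hget : PySem.List.pyGet? l (i : Int) = some l[i] := by
    rw [PySem.List.pyGet?_natCast, List.getElem?_eq_getElem hi]
  have hu1 : (if (pvCnt (pvWin l Ln i) (pvEnc l[i]) : Int) + 1 = count
        then pvU count (pvWin l Ln i) + 1 else pvU count (pvWin l Ln i)) =
      pvU count (pvWin l Ln i ++ [l[i]]) := by
    rw [pvU_append]
    split_ifs <;> omega
  unfold pvAStep pvOrd
  rw [hget]
  simp only [Option.getD_some]
  rw [pvSetD_wrap _ (pvFv_length _) _ hc.1 hc.2,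
    pvGetD_wrap _ (pvFv_length _) _ hc.1 hc.2, pvFv_getD _ _ (pvEnc_lt _), pvFv_set_inc,
    pvGetD_wrap _ (pvFv_length _) _ hc.1 hc.2, pvFv_getD _ _ (pvEnc_lt _),
    pvCnt_append, if_pos rfl]
  push_cast
  rw [hu1]
  have hcond : (k * count ≤ (i : Int)) ↔ Ln ≤ i := by
    rw [← hL]
    exact_mod_cast Iff.rfl
  by_cases hbig : Ln ≤ i
  · rw [if_pos (hcond.mpr hbig)]
    have hxmem : l[i - Ln]'(by omega) ∈ l := List.getElem_mem (by omega)
    have hx := hchars _ hxmem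
    have hidx : (i : Int) - k * count = ((i - Ln : Nat) : Int) := by
      rw [← hL]
      omega
    have hgetx : PySem.List.pyGet? l ((i : Int) - k * count) = some (l[i - Ln]'(by omega)) := by
      rw [hidx, PySem.List.pyGet?_natCast, List.getElem?_eq_getElem (by omega)]
    rw [hgetx]
    simp only [Option.getD_some]
    rw [pvWin_succ_big l Ln i hi hbig]
    simp only [pvGetD_wrap _ (pvFv_length _) _ hx.1 hx.2, pvFv_getD _ _ (pvEnc_lt _)]
    rw [pvSetD_wrap _ (pvFv_length _) _ hx.1 hx.2, pvFv_set_dec,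
      pvU_uncons count (pvWin l Ln (i + 1)) (l[i - Ln]'(by omega))]
    split_ifs <;> simp <;> omega
  · rw [if_neg (fun hh => hbig (hcond.mp hh))]
    rw [pvWin_succ_small l Ln i hi (by omega)]

lemma pvU_nil_pos (count : Int) (hc : 1 ≤ count) : pvU count [] = 0 := by
  unfold pvU
  rw [Finset.filter_false_of_mem, Finset.card_empty]
  · rfl
  · intro j _
    simp only [pvCnt, List.countP_nil]
    omega

lemma pvWin_zero (l : List Char) (Ln : Nat) : pvWin l Ln 0 = [] := by
  simp [pvWin]

-- the A inner loop keeps (pvFv win, pvU win, ans + #good ends) — the count ≥ 1 case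
lemma pvInnerA (count k : Int) (l : List Char)
    (hchars : ∀ c ∈ l, 71 ≤ c.toNat ∧ c.toNat ≤ 122)
    (hc : 1 ≤ count) (Ln : Nat) (hL : (Ln : Int) = k * count) :
    ∀ (i : Nat), i ≤ l.length → ∀ (a : Int),
      (PySem.List.pyRange 0 (i : Int) 1).foldl (pvAStep count k l)
          (List.replicate 26 0, 0, a) =
        (pvFv (pvWin l Ln i), pvU count (pvWin l Ln i),
         a + ((List.range i).countP
            (fun m => pvU count (pvWin l Ln (m + 1)) == k) : Int)) := by
  intro i
  induction i with
  | zero =>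
    intro _ a
    rw [PySem.List.pyRange_one_eq_nil (by omega), pvWin_zero, pvFv_nil,
      pvU_nil_pos count hc]
    simp
  | succ i ih =>
    intro hle a
    have hi : i < l.length := by omega
    rw [show ((i + 1 : Nat) : Int) = (i : Int) + 1 by push_cast; ring,
      PySem.List.pyRange_one_succ_right (by omega), List.foldl_append,
      ih (by omega) a, List.foldl_cons, List.foldl_nil,
      pvAStep_eq count k l hchars Ln hL i hi, List.range_succ, List.countP_append]
    simp only [List.countP_cons, List.countP_nil]
    by_cases hg : pvU count (pvWin l Ln (i + 1)) = k
    · rw [if_pos hg]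
      simp [hg]
      ring
    · rw [if_neg hg]
      simp [hg]

-- count = 0: A's unique counter never moves and the answer never changes
lemma pvInnerA_zero (k : Int) (l : List Char)
    (hchars : ∀ c ∈ l, 71 ≤ c.toNat ∧ c.toNat ≤ 122) (hk : 1 ≤ k) :
    ∀ (i : Nat), i ≤ l.length → ∀ (a : Int),
      (PySem.List.pyRange 0 (i : Int) 1).foldl (pvAStep 0 k l)
          (List.replicate 26 0, 0, a) = (List.replicate 26 0, 0, a) := by
  intro i
  induction i with
  | zero =>
    intro _ a
    rw [PySem.List.pyRange_one_eq_nil (by omega)]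
    rfl
  | succ i ih =>
    intro hle a
    have hi : i < l.length := by omega
    have hmem : l[i] ∈ l := List.getElem_mem hi
    have hc := hchars l[i] hmem
    have hget : PySem.List.pyGet? l (i : Int) = some l[i] := by
      rw [PySem.List.pyGet?_natCast, List.getElem?_eq_getElem hi]
    rw [show ((i + 1 : Nat) : Int) = (i : Int) + 1 by push_cast; ring,
      PySem.List.pyRange_one_succ_right (by omega), List.foldl_append,
      ih (by omega) a, List.foldl_cons, List.foldl_nil]
    unfold pvAStep pvOrd
    rw [hget]
    simp only [Option.getD_some, mul_zero]
    rw [if_pos (by omega : (0 : Int) ≤ (i : Int)), sub_zero, hget]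
    simp only [Option.getD_some]
    rw [show (List.replicate 26 (0 : Int)) = pvFv [] from pvFv_nil.symm]
    rw [pvSetD_wrap _ (pvFv_length _) _ hc.1 hc.2,
      pvGetD_wrap _ (pvFv_length _) _ hc.1 hc.2, pvFv_getD _ _ (pvEnc_lt _)]
    rw [pvFv_set_inc]
    simp only [List.nil_append]
    simp only [pvGetD_wrap _ (pvFv_length _) _ hc.1 hc.2, pvFv_getD _ _ (pvEnc_lt _)]
    rw [pvSetD_wrap _ (pvFv_length _) _ hc.1 hc.2]
    rw [show ([l[i]] : List Char) = l[i] :: [] from rfl, pvFv_set_dec]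
    have hcnt1 : (pvCnt (l[i] :: []) (pvEnc l[i]) : Int) = 1 := by
      rw [pvCnt_cons, if_pos rfl]
      simp [pvCnt]
    rw [hcnt1]
    norm_num
    omega

-- B's per-window recount builds exactly the abstract table
lemma pvWinFreqs_eq (w : List Char) (hchars : ∀ c ∈ w, 71 ≤ c.toNat ∧ c.toNat ≤ 122) :
    pvWinFreqs w = pvFv w := by
  induction w using List.reverseRecOn with
  | nil => rw [pvFv_nil]; rfl
  | append_singleton w c ih =>
    have hc := hchars c (by simp)
    have hw : ∀ c ∈ w, 71 ≤ c.toNat ∧ c.toNat ≤ 122 := fun x hx => hchars x (by simp [hx])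
    unfold pvWinFreqs at ih ⊢
    rw [List.foldl_append, ih hw]
    simp only [List.foldl_cons, List.foldl_nil]
    rw [pvGetD_wrap _ (pvFv_length w) c hc.1 hc.2, pvSetD_wrap _ (pvFv_length w) c hc.1 hc.2,
      pvFv_getD w (pvEnc c) (pvEnc_lt c), pvFv_set_inc]

lemma pvAll_iff (count : Int) (w : List Char) :
    ((pvFv w).all (fun f => f == 0 || f == count) = true) ↔
      (∀ j, pvCnt w j = 0 ∨ (pvCnt w j : Int) = count) := by
  rw [List.all_eq_true]
  constructor
  · intro h j
    by_cases hj : j < 26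
    · have := h _ (List.mem_map.mpr ⟨j, List.mem_range.mpr hj, rfl⟩)
      simpa using this
    · exact Or.inl (pvCnt_ge w j (by omega))
  · intro h f hf
    obtain ⟨j, _, rfl⟩ := List.mem_map.mp hf
    rcases h j with h0 | h0 <;> simp [h0]

lemma pvCountP_shift (n Ln : Nat) (h1 : 1 ≤ Ln) (h2 : Ln ≤ n) (p q : Nat → Bool)
    (hlow : ∀ m, m + 1 < Ln → p m = false)
    (hmatch : ∀ st, st ≤ n - Ln → p (Ln - 1 + st) = q st) :
    (List.range n).countP p = (List.range (n - Ln + 1)).countP q := by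
  have hn : n = (Ln - 1) + (n - Ln + 1) := by omega
  have key : (List.range n).countP p =
      0 + (List.range (n - Ln + 1)).countP (p ∘ fun x => Ln - 1 + x) := by
    conv_lhs => rw [hn]
    rw [List.range_add, List.countP_append, List.countP_map, List.countP_eq_zero.mpr
      (fun m hm => by rw [show p m = false from hlow m (by simp at hm; omega)]; simp)]
  rw [key, Nat.zero_add]
  exact List.countP_congr (fun st hst => by
    show ((p ∘ fun x => Ln - 1 + x) st = true) ↔ (q st = true)
    rw [Function.comp_apply, hmatch st (by have := List.mem_range.mp hst; omega)])

-- the per-k agreement of A's inner loop with B's branch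
lemma pvPerK (s : String) (count : Int)
    (hchars : ∀ c ∈ s.toList, 71 ≤ c.toNat ∧ c.toNat ≤ 122)
    (hcnt : s.toList = [] ∨ 0 ≤ count)
    (k : Int) (hk1 : 1 ≤ k) (hk2 : k < 27) (a : Int) :
    ((PySem.List.pyRange 0 (PySem.List.len s.toList) 1).foldl (pvAStep count k s.toList)
        (List.replicate 26 0, 0, a)).2.2 =
      (if k * count ≤ 0 ∨ PySem.List.len s.toList < k * count then a
       else
        (PySem.List.pyRange 0 (PySem.List.len s.toList - k * count + 1) 1).foldl
          (fun ans start =>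
            if (pvWinFreqs (PySem.List.slice s.toList (some start) (some (start + k * count)))).all
                (fun f => f == 0 || f == count) then ans + 1
            else ans)
          a) := by
  simp only [PySem.List.len_eq]
  rcases lt_trichotomy count 0 with hneg | h0 | hpos
  · -- count < 0 forces the empty string under Pre_: both sides are `a`
    have hl : s.toList = [] := by
      rcases hcnt with h | h
      · exact h
      · omega
    have hL0 : k * count ≤ 0 := mul_nonpos_of_nonneg_of_nonpos (by omega) (by omega)
    rw [if_pos (Or.inl hL0), hl]
    rw [show ((([] : List Char).length : Int)) = 0 from rfl, PySem.List.pyRange_one_eq_nil le_rfl]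
    rfl
  · -- count = 0: A's unique counter never fires, B skips every k
    subst h0
    rw [mul_zero, if_pos (Or.inl le_rfl),
      pvInnerA_zero k s.toList hchars hk1 s.toList.length le_rfl a]
  · -- count ≥ 1
    have hkpos : (0 : Int) < k := by omega
    set n := s.toList.length with hn
    set cN := count.toNat with hcNdef
    set kN := k.toNat with hkNdef
    have hcN : (cN : Int) = count := Int.toNat_of_nonneg (by omega)
    have hkN : (kN : Int) = k := Int.toNat_of_nonneg (by omega)
    set Ln := kN * cN with hLdef
    have hL : (Ln : Int) = k * count := by
      rw [hLdef, Nat.cast_mul, hcN, hkN]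
    have hcN1 : 1 ≤ cN := by omega
    have hkN1 : 1 ≤ kN := by omega
    have hLn1 : 1 ≤ Ln := Nat.mul_le_mul hkN1 hcN1
    have hLpos : ¬ (k * count ≤ 0) := by
      rw [← hL]
      omega
    clear_value Ln
    clear_value n

    rw [pvInnerA count k s.toList hchars hpos Ln hL n (le_of_eq hn) a]
    -- the window-length bound needed by pvU_iff
    have hWlen : ∀ m : Nat, m + 1 ≤ n → (pvWin s.toList Ln (m + 1)).length = min (m + 1) Ln :=
      fun m hm => pvWin_length s.toList Ln (m + 1) (hn ▸ hm)
    -- `good m` in its pvU_iff normal form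
    have hGood : ∀ m : Nat, m + 1 ≤ n →
        ((pvU count (pvWin s.toList Ln (m + 1)) == k) = true ↔
          ((pvWin s.toList Ln (m + 1)).length = Ln ∧
           ∀ j, pvCnt (pvWin s.toList Ln (m + 1)) j = 0 ∨
             pvCnt (pvWin s.toList Ln (m + 1)) j = cN)) := by
      intro m hm
      rw [beq_iff_eq]
      rw [← hcN, ← hkN]
      have := pvU_iff cN kN hcN1 (pvWin s.toList Ln (m + 1)) (by rw [hWlen m hm]; omega)
      rw [this, ← hLdef]
    by_cases hbig : Ln ≤ n
    · rw [if_neg (by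
        rintro (h | h)
        · exact hLpos h
        · rw [← hL] at h
          have : n < Ln := by exact_mod_cast h
          omega)]
      have hM : (n : Int) - k * count + 1 = ((n - Ln + 1 : Nat) : Int) := by
        rw [← hL]
        push_cast
        omega
      rw [hM, PySem.List.pyRange_zero_natCast, List.foldl_map,
        PySem.List.foldl_if_add_one
          (fun st : Nat => (pvWinFreqs (PySem.List.slice s.toList (some (st : Int))
            (some ((st : Int) + k * count)))).all (fun f => f == 0 || f == count))
          (List.range (n - Ln + 1)) a]
      rw [pvCountP_shift n Ln hLn1 hbig _ _ ?hlow ?hmatch]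
      case hlow =>
        intro m hm
        rw [Bool.eq_false_iff]
        intro hgood
        have h1 := (hGood m (by omega)).mp hgood
        rw [hWlen m (by omega)] at h1
        omega
      case hmatch =>
        intro st hst
        have hsl := Nat.sub_add_cancel hbig
        have hle : Ln + st ≤ n := by omega
        have hwin : pvWin s.toList Ln (Ln + st) = (s.toList.drop st).take Ln := by
          rw [pvWin_eq_slice s.toList Ln (Ln + st) (hn ▸ hle) (by omega),
            Nat.add_sub_cancel_left]
        have hslice : PySem.List.slice s.toList (some (st : Int)) (some ((st : Int) + k * count)) =
            (s.toList.drop st).take Ln := by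
          rw [← hL, show ((st : Int) + (Ln : Int)) = ((st + Ln : Nat) : Int) by push_cast; ring,
            show ((st + Ln : Nat) : Int) = ((st : Int) + (Ln : Int)) by push_cast; ring]
          exact PySem.List.slice_natCast_add s.toList st Ln
        have hsub : ∀ c ∈ (s.toList.drop st).take Ln, 71 ≤ c.toNat ∧ c.toNat ≤ 122 :=
          fun c hc => hchars c (List.mem_of_mem_drop (List.mem_of_mem_take hc))
        rw [Bool.eq_iff_iff, hGood (Ln - 1 + st) (by omega)]
        rw [show Ln - 1 + st + 1 = Ln + st by omega, hwin, hslice, pvWinFreqs_eq _ hsub,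
          pvAll_iff]
        have hlen' : ((s.toList.drop st).take Ln).length = Ln := by
          rw [List.length_take, List.length_drop]
          omega
        constructor
        · rintro ⟨_, h2⟩ j
          rcases h2 j with h | h
          · exact Or.inl h
          · exact Or.inr (by rw [h, hcN])
        · intro h2
          refine ⟨hlen', fun j => ?_⟩
          rcases h2 j with h | h
          · exact Or.inl h
          · right
            have : (pvCnt ((s.toList.drop st).take Ln) j : Int) = (cN : Int) := by
              rw [h, hcN]
            exact_mod_cast this
    · -- window longer than the string: no full window exists
      rw [if_pos (Or.inr (by rw [← hL]; exact_mod_cast by omega))]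
      have hzero : (List.range n).countP
          (fun m => pvU count (pvWin s.toList Ln (m + 1)) == k) = 0 := by
        rw [List.countP_eq_zero]
        intro m hm
        have hmn := List.mem_range.mp hm
        intro hgood
        have h1 := (hGood m (by omega)).mp hgood
        rw [hWlen m (by omega)] at h1
        omega
      rw [hzero]
      simp

-- ===== VERDICT (by name: the statement is the Claim_ definition above) =====
theorem equalCountSubstrings_spec : Claim_equal_equalCountSubstrings := by
  intro s count _ hpre
  have hchars : ∀ c ∈ s.toList, 71 ≤ c.toNat ∧ c.toNat ≤ 122 := by
    have h := hpre.1
    rw [List.all_eq_true] at h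
    intro c hc
    have := h c hc
    simp only [Bool.and_eq_true, decide_eq_true_eq] at this
    exact this
  unfold Spec_equalCountSubstrings equalCountSubstrings equalCountSubstrings_alt
  apply PySem.List.foldl_congr_mem
  intro a k hk
  rw [PySem.List.mem_pyRange_one] at hk
  exact pvPerK s count hchars hpre.2 k hk.1 hk.2 a
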